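-- pv_equiv track=rewrite | github.com/jiyeon2536/algorithm | 프로그래머스/1/77484. 로또의 최고 순위와 최저 순위/로또의 최고 순위와 최저 순위.py | solution
-- ===== SOURCE A (Python) =====
-- def solution(lottos, win_nums):
--     answer = [0, 0]
--
--     win_dict = {}
--     for w in win_nums:
--         win_dict[w] = 0
--
--     unknown = 0
--     for l in lottos:
--         if l in win_dict:
--             win_dict[l] = 1
--         if l == 0:
--             unknown += 1
--
--     answer[1] = min(7 - sum(win_dict.values()), 6)
--     answer[0] = min(7 - (sum(win_dict.values()) + unknown), 6)
--
--     return answer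
-- ===== SOURCE B (Python) =====
-- def solution(lottos, win_nums):
--     xs = sorted(set(lottos))
--     ys = sorted(set(win_nums))
--     i = j = 0
--     matched = 0
--     while i < len(xs) and j < len(ys):
--         if xs[i] < ys[j]:
--             i += 1
--         elif ys[j] < xs[i]:
--             j += 1
--         else:
--             matched += 1
--             i += 1
--             j += 1
--     zeros = lottos.count(0)
--     return [min(7 - matched - zeros, 6), min(7 - matched, 6)]
-- ===== Notes on version B (the rewrite author's own statement) =====
-- stated objective: alternative
-- what changed: Replaces A's dict-marking (flag dict over win_nums, flip flags scanning lottos, sum values) with a sort-then-merge algorithm: both inputs are deduplicated and sorted and a two-pointer merge walk counts the common elements; zeros are counted directly and the two ranks computed by formula.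
import Mathlib
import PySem

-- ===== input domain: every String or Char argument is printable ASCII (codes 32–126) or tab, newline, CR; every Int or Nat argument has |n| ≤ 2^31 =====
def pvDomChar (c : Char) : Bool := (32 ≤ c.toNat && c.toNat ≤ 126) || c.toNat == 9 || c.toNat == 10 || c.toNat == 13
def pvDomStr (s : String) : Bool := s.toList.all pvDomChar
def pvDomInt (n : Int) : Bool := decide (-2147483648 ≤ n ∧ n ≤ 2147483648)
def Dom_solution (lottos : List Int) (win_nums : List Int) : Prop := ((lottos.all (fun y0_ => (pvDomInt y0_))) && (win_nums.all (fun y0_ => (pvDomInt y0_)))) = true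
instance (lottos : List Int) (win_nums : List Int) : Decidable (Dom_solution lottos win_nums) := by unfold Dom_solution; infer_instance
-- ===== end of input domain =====

-- B replaces A's dict-marking loops with sort-then-merge: both inputs are deduplicated
-- and sorted, a two-pointer merge walk counts the common elements (objective: alternative).

-- ===== PORT A =====
def solution (lottos : List Int) (win_nums : List Int) : List Int :=
  let answer : List Int := [0, 0]
  let win_dict : PySem.Dict Int Int :=
    win_nums.foldl (fun d w => d.insert w 0) PySem.Dict.empty
  let st : PySem.Dict Int Int × Int :=
    lottos.foldl (fun st l =>
      (if st.1.contains l then st.1.insert l 1 else st.1,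
       if l = 0 then st.2 + 1 else st.2)) (win_dict, 0)
  let answer := PySem.List.pySetD answer 1 (min (7 - st.1.values.sum) 6)
  let answer := PySem.List.pySetD answer 0 (min (7 - (st.1.values.sum + st.2)) 6)
  answer

-- ===== PORT B =====
-- the while loop over indices i, j of Source B, as the obvious recursion on the two suffixes
def pvTwoPtr : List Int → List Int → Int
  | [], _ => 0
  | _ :: _, [] => 0
  | x :: xs, y :: ys =>
      if x < y then pvTwoPtr xs (y :: ys)
      else if y < x then pvTwoPtr (x :: xs) ys
      else 1 + pvTwoPtr xs ys

def solution_alt (lottos : List Int) (win_nums : List Int) : List Int :=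
  let xs := PySem.List.sorted (PySem.Set.ofList lottos) (fun x => x) false
  let ys := PySem.List.sorted (PySem.Set.ofList win_nums) (fun x => x) false
  let matched : Int := pvTwoPtr xs ys
  let zeros : Int := (PySem.List.count lottos 0 : Int)
  [min (7 - matched - zeros) 6, min (7 - matched) 6]

-- ===== PRECONDITION & SPEC =====
def Spec_solution (lottos : List Int) (win_nums : List Int) (out : List Int) : Prop := out = solution_alt lottos win_nums
instance (lottos : List Int) (win_nums : List Int) (out : List Int) : Decidable (Spec_solution lottos win_nums out) := by unfold Spec_solution; infer_instance

-- ===== CLAIM (what is proved, stated in full; the proofs are below) =====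
def Claim_equal_solution : Prop := ∀ (lottos : List Int) (win_nums : List Int), Dom_solution lottos win_nums → Spec_solution lottos win_nums (solution lottos win_nums)

-- ===== LEMMAS AND PROOFS =====

-- A's single loop over lottos splits into its dict component and the zero counter.
theorem pv_fold_split (ls : List Int) (d : PySem.Dict Int Int) (u : Int) :
    ls.foldl (fun (st : PySem.Dict Int Int × Int) l =>
      (if st.1.contains l then st.1.insert l 1 else st.1,
       if l = 0 then st.2 + 1 else st.2)) (d, u)
    = (ls.foldl (fun d l => if d.contains l then d.insert l 1 else d) d,
       u + (ls.count 0 : Int)) := by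
  induction ls generalizing d u with
  | nil => simp
  | cons x xs ih =>
      simp only [List.foldl_cons, ih, List.count_cons]
      by_cases hx : x = 0
      · simp [hx]; ring_nf
      · simp [hx]

-- The initialisation loop leaves every default-0 lookup at 0.
theorem pv_init_getD (ws : List Int) (d : PySem.Dict Int Int)
    (h : ∀ k, d.getD k 0 = 0) (k : Int) :
    (ws.foldl (fun d w => d.insert w 0) d).getD k 0 = 0 := by
  induction ws generalizing d with
  | nil => exact h k
  | cons w ws ih =>
      simp only [List.foldl_cons]
      exact ih _ (fun k' => by rw [PySem.Dict.getD_insert]; split <;> [rfl; exact h k'])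

-- The marking loop preserves keys.
theorem pv_mark_keys (ls : List Int) (d : PySem.Dict Int Int) :
    (ls.foldl (fun d l => if d.contains l then d.insert l 1 else d) d).keys = d.keys := by
  induction ls generalizing d with
  | nil => rfl
  | cons x xs ih =>
      simp only [List.foldl_cons]
      rw [ih]
      by_cases h : d.contains x = true
      · simp [h, PySem.Dict.keys_insert_of_contains d 1 h]
      · simp [h]

-- What the marking loop does to each default-0 lookup.
theorem pv_mark_getD (ls : List Int) (d : PySem.Dict Int Int) (k : Int) :
    (ls.foldl (fun d l => if d.contains l then d.insert l 1 else d) d).getD k 0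
    = if d.contains k = true ∧ k ∈ ls then 1 else d.getD k 0 := by
  induction ls generalizing d with
  | nil => simp
  | cons x xs ih =>
      simp only [List.foldl_cons, ih]
      by_cases hc : d.contains x = true
      · simp only [hc, if_true]
        by_cases hk : k = x
        · subst hk
          simp [PySem.Dict.contains_insert_self, PySem.Dict.getD_insert_self, hc]
        · rw [PySem.Dict.getD_insert_of_ne _ _ _ hk]
          have : (d.insert x 1).contains k = d.contains k := by
            simp [PySem.Dict.contains_insert, hk]
          rw [this]
          simp only [List.mem_cons]
          by_cases hm : k ∈ xs <;> simp [hm, hk]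
      · simp only [hc]
        by_cases hk : k = x
        · subst hk
          simp [hc]
        · simp only [List.mem_cons]
          by_cases hm : k ∈ xs <;> simp [hm, hk]

-- Two nodup lists filtered by mutual membership have equal lengths.
theorem pv_count_symm (xs ys : List Int) :
    ((PySem.Set.ofList xs).filter (fun x => decide (x ∈ ys))).length
    = ((PySem.Set.ofList ys).filter (fun y => decide (y ∈ xs))).length := by
  apply List.Perm.length_eq
  rw [List.perm_ext_iff_of_nodup
        (List.Nodup.filter _ (PySem.Set.nodup_ofList xs))
        (List.Nodup.filter _ (PySem.Set.nodup_ofList ys))]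
  intro a
  simp [List.mem_filter, PySem.Set.mem_ofList, and_comm]

-- The summed dict values equal the intersection size.
theorem pv_matched_eq (lottos win_nums : List Int) :
    ((lottos.foldl (fun d l => if d.contains l then d.insert l 1 else d)
        (win_nums.foldl (fun d w => d.insert w 0) PySem.Dict.empty)).values).sum
    = PySem.Set.len (PySem.Set.inter (PySem.Set.ofList lottos) (PySem.Set.ofList win_nums)) := by
  set d0 : PySem.Dict Int Int := win_nums.foldl (fun d w => d.insert w 0) PySem.Dict.empty with hd0
  set D : PySem.Dict Int Int := lottos.foldl (fun d l => if d.contains l then d.insert l 1 else d) d0 with hD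
  have hkeys0 : d0.keys = PySem.Set.ofList win_nums := by
    rw [hd0]
    have := PySem.Dict.keys_foldl_insert (ν := Int) win_nums (fun _ _ => 0) PySem.Dict.empty
    simpa [PySem.Set.update_nil_left] using this
  have hkeys : D.keys = PySem.Set.ofList win_nums := by
    rw [hD, pv_mark_keys, hkeys0]
  have hnodup : D.keys.Nodup := by rw [hkeys]; exact PySem.Set.nodup_ofList _
  have hvals : D.values = D.keys.map (fun k => D.getD k 0) :=
    PySem.Dict.values_eq_map_keys D hnodup 0
  have hgetd0 : ∀ k, d0.getD k 0 = 0 := by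
    intro k
    exact pv_init_getD win_nums PySem.Dict.empty (fun k => PySem.Dict.getD_empty k 0) k
  have hget : ∀ k ∈ D.keys, D.getD k 0 = if decide (k ∈ lottos) = true then (1:Int) else 0 := by
    intro k hk
    rw [hD, pv_mark_getD]
    have hc : d0.contains k = true := by
      rw [PySem.Dict.contains_iff_mem_keys, hkeys0]
      rw [hkeys] at hk; exact hk
    by_cases hm : k ∈ lottos <;> simp [hc, hm, hgetd0]
  rw [hvals, List.map_congr_left hget, PySem.List.sum_map_ite_one_zero, hkeys]
  rw [PySem.Set.inter, PySem.Set.len]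
  have : (PySem.Set.ofList lottos).filter (fun x => (PySem.Set.ofList win_nums).contains x)
      = (PySem.Set.ofList lottos).filter (fun x => decide (x ∈ win_nums)) := by
    apply List.filter_congr
    intro x _
    simp [PySem.Set.mem_ofList]
  rw [this, ← pv_count_symm, List.countP_eq_length_filter]

-- On strictly increasing lists, the two-pointer merge counts the common elements.
theorem pv_twoPtr_countP (n : ℕ) (xs ys : List Int)
    (hn : xs.length + ys.length ≤ n)
    (hx : xs.Pairwise (· < ·)) (hy : ys.Pairwise (· < ·)) :
    pvTwoPtr xs ys = (xs.countP (fun x => decide (x ∈ ys)) : Int) := by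
  induction n generalizing xs ys with
  | zero =>
      have hx0 : xs = [] := by
        cases xs with
        | nil => rfl
        | cons a t => simp at hn
      subst hx0; simp [pvTwoPtr]
  | succ n ih =>
      cases xs with
      | nil => simp [pvTwoPtr]
      | cons x xs' =>
        cases ys with
        | nil => simp [pvTwoPtr]
        | cons y ys' =>
          have hxs' : xs'.Pairwise (· < ·) := hx.tail
          have hys' : ys'.Pairwise (· < ·) := hy.tail
          rcases lt_trichotomy x y with h | h | h
          · -- x < y : x is in neither y :: ys'
            have hnot : x ∉ y :: ys' := by
              intro hmem
              rcases List.mem_cons.mp hmem with rfl | hmem'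
              · exact lt_irrefl x h
              · have := List.rel_of_pairwise_cons hy hmem'
                exact lt_irrefl x (h.trans this)
            have := ih xs' (y :: ys') (by simp at hn ⊢; omega) hxs' hy
            simp only [pvTwoPtr, if_pos h]
            rw [this, List.countP_cons]
            simp [hnot]
          · -- x = y : count it, drop both heads
            subst h
            have hrec := ih xs' ys' (by simp at hn ⊢; omega) hxs' hys'
            have hcongr : xs'.countP (fun z => decide (z ∈ x :: ys'))
                = xs'.countP (fun z => decide (z ∈ ys')) := by
              apply List.countP_congr
              intro z hz
              have hne : z ≠ x := (List.rel_of_pairwise_cons hx hz).ne'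
              simp [List.mem_cons, hne]
            simp only [pvTwoPtr, lt_irrefl]
            rw [hrec, List.countP_cons, hcongr]
            have hself : decide (x ∈ x :: ys') = true := by simp
            rw [hself]
            simp
            ring
          · -- y < x : y matches nothing in x :: xs'
            have hcongr : (x :: xs').countP (fun z => decide (z ∈ y :: ys'))
                = (x :: xs').countP (fun z => decide (z ∈ ys')) := by
              apply List.countP_congr
              intro z hz
              have hyz : y < z := by
                rcases List.mem_cons.mp hz with rfl | hz'
                · exact h
                · exact h.trans (List.rel_of_pairwise_cons hx hz')
              have hne : z ≠ y := hyz.ne'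
              simp [List.mem_cons, hne]
            have := ih (x :: xs') ys' (by simp at hn ⊢; omega) hx hys'
            simp only [pvTwoPtr, if_neg (not_lt.mpr h.le), if_pos h]
            rw [this, ← hcongr]

-- The two-pointer count over the sorted dedup lists is the intersection size.
theorem pv_twoPtr_eq (lottos win_nums : List Int) :
    pvTwoPtr (PySem.List.sorted (PySem.Set.ofList lottos) (fun x => x) false)
             (PySem.List.sorted (PySem.Set.ofList win_nums) (fun x => x) false)
    = PySem.Set.len (PySem.Set.inter (PySem.Set.ofList lottos) (PySem.Set.ofList win_nums)) := by
  set xs := PySem.List.sorted (PySem.Set.ofList lottos) (fun x => x) false with hxs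
  set ys := PySem.List.sorted (PySem.Set.ofList win_nums) (fun x => x) false with hys
  have hpx : xs.Pairwise (· < ·) := PySem.List.sorted_ofList_pairwise_lt lottos
  have hpy : ys.Pairwise (· < ·) := PySem.List.sorted_ofList_pairwise_lt win_nums
  rw [pv_twoPtr_countP (xs.length + ys.length) xs ys le_rfl hpx hpy]
  have h1 : xs.countP (fun x => decide (x ∈ ys)) =
      xs.countP (fun x => decide (x ∈ win_nums)) := by
    apply List.countP_congr
    intro z _
    simp [hys, PySem.List.mem_sorted, PySem.Set.mem_ofList]
  have hperm : xs.Perm (PySem.Set.ofList lottos) := PySem.List.sorted_perm _ _ _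
  rw [h1, hperm.countP_eq]
  rw [PySem.Set.inter, PySem.Set.len]
  have h2 : (PySem.Set.ofList lottos).filter (fun x => (PySem.Set.ofList win_nums).contains x)
      = (PySem.Set.ofList lottos).filter (fun x => decide (x ∈ win_nums)) := by
    apply List.filter_congr
    intro x _
    simp [PySem.Set.mem_ofList]
  rw [h2, List.countP_eq_length_filter]

-- ===== VERDICT (by name: the statement is the Claim_ definition above) =====
theorem solution_spec : Claim_equal_solution := by
  intro lottos win_nums _
  unfold Spec_solution solution solution_alt
  simp only [pv_fold_split, zero_add]
  rw [pv_matched_eq, ← pv_twoPtr_eq]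
  simp [PySem.List.pySetD, PySem.List.pySet?, PySem.List.pyIdx?, PySem.List.count,
        sub_add_eq_sub_sub]
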